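-- pv_equiv track=rewrite | github.com/scottjrodgers/what-not-how | src/what_not_how/dsl_parser.py | index_of_next_space
-- ===== SOURCE A (Python) =====
-- def index_of_next_space(line, start) -> int:
--     if start < 0 or start >= len(line):
--         return -1
--     special_char = None
--     if line[start] in [":", ","]:
--         special_char = line[start]
--     for i in range(start, len(line)):
--         if (not special_char) and line[i] in [" ", ":", ","]:
--             return i
--         elif special_char and line[i] != special_char:
--             return i
--     return -1
-- ===== SOURCE B (Python) =====
-- def index_of_next_space(line, start) -> int:
--     if start < 0 or start >= len(line):
--         return -1
--     ch = line[start]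
--     if ch in ":,":
--         # skip the run of the special character, no per-character delimiter test
--         j = start + 1
--         while j < len(line) and line[j] == ch:
--             j += 1
--         return j if j < len(line) else -1
--     # delegate the scan to substring search: one find per delimiter, take the earliest hit
--     candidates = [j for j in (line.find(d, start) for d in " :,") if j != -1]
--     return min(candidates, default=-1)
-- ===== Notes on version B (the rewrite author's own statement) =====
-- stated objective: faster
-- what changed: Replaces A's single index loop carrying a special_char flag by a branch-first design: the special case skips the run of the repeated character directly, and the normal case is three str.find substring searches whose earliest hit is taken with min(..., default=-1), instead of testing each character against a list per iteration.
import Mathlib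
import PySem

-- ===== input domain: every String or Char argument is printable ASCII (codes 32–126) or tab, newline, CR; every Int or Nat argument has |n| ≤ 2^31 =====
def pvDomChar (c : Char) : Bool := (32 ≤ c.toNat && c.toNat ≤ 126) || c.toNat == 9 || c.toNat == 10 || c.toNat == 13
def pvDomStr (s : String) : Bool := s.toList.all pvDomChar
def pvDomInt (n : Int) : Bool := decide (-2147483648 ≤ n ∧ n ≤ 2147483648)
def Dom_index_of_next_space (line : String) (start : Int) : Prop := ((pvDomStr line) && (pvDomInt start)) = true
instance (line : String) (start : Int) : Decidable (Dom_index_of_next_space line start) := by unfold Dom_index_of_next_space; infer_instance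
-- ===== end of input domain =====

-- B replaces A's single flag-carrying index loop by a branch-first design: run-skip for the
-- special character, otherwise three substring searches (str.find) combined with min; the
-- timing run measured B faster than A on its large generated inputs (constant-factor).

-- ===== PORT A =====
-- the 'for i in range(start, len(line))' loop with its two early returns
def loopA (cs : List Char) (special : Option Char) (i : Nat) : Int :=
  if h : i < cs.length then
    if special = none ∧ (cs[i] = ' ' ∨ cs[i] = ':' ∨ cs[i] = ',') then (i : Int)
    else if special ≠ none ∧ some cs[i] ≠ special then (i : Int)
    else loopA cs special (i + 1)
  else -1
termination_by cs.length - i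

def index_of_next_space (line : String) (start : Int) : Int :=
  if start < 0 ∨ start ≥ PySem.Str.len line then -1
  else
    -- line[start]: the guard above puts the index in range, so getD is exact
    loopA line.toList
      (if line.toList.getD start.toNat ' ' = ':' ∨ line.toList.getD start.toNat ' ' = ',' then
        some (line.toList.getD start.toNat ' ') else none)
      start.toNat

-- ===== PORT B =====
-- the 'while j < len(line) and line[j] == ch: j += 1' loop followed by 'j if j < len(line) else -1'
def skipRunB (cs : List Char) (ch : Char) (j : Nat) : Int :=
  if h : j < cs.length then
    if cs[j] = ch then skipRunB cs ch (j + 1) else (j : Int)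
  else -1
termination_by cs.length - j

def index_of_next_space_alt (line : String) (start : Int) : Int :=
  if start < 0 ∨ start ≥ PySem.Str.len line then -1
  else
    -- ch := line[start] (in range by the guard)
    if line.toList.getD start.toNat ' ' = ':' ∨ line.toList.getD start.toNat ' ' = ',' then
      skipRunB line.toList (line.toList.getD start.toNat ' ') (start.toNat + 1)
    else
      PySem.List.minD
        (([" ", ":", ","].map (fun d => PySem.Str.findFrom line d start)).filter (· ≠ -1))
        (fun x => x) (-1)

-- ===== PRECONDITION & SPEC =====
def Spec_index_of_next_space (line : String) (start : Int) (out : Int) : Prop := out = index_of_next_space_alt line start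
instance (line : String) (start : Int) (out : Int) : Decidable (Spec_index_of_next_space line start out) := by unfold Spec_index_of_next_space; infer_instance

-- ===== CLAIM (what is proved, stated in full; the proofs are below) =====
def Claim_equal_index_of_next_space : Prop := ∀ (line : String) (start : Int), Dom_index_of_next_space line start → Spec_index_of_next_space line start (index_of_next_space line start)

-- ===== LEMMAS AND PROOFS =====

-- relative first index of d in t, Python's -1 convention
def rf (d : Char) : List Char → Int
  | [] => -1
  | c :: t => if c = d then 0 else (if rf d t = -1 then -1 else rf d t + 1)

-- relative first index of any delimiter in t
def ra : List Char → Int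
  | [] => -1
  | c :: t => if c = ' ' ∨ c = ':' ∨ c = ',' then 0 else (if ra t = -1 then -1 else ra t + 1)

def cmin (a b : Int) : Int := if a = -1 then b else if b = -1 then a else if a ≤ b then a else b

theorem rf_ge (d : Char) (t : List Char) : -1 ≤ rf d t := by
  induction t with
  | nil => simp [rf]
  | cons c t ih => simp only [rf]; split_ifs <;> omega

theorem ra_ge (t : List Char) : -1 ≤ ra t := by
  induction t with
  | nil => simp [ra]
  | cons c t ih => simp only [ra]; split_ifs <;> omega

theorem go_singleton (d : Char) (t : List Char) (k : Nat) :
    PySem.Chars.find.go [d] t k = if rf d t = -1 then -1 else (k : Int) + rf d t := by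
  induction t generalizing k with
  | nil => simp [PySem.Chars.find.go, rf]
  | cons c t ih =>
      have hge := rf_ge d t
      simp only [PySem.Chars.find.go, rf, ih]
      by_cases h : c = d
      · simp [h, List.isPrefixOf]
      · have : ([d].isPrefixOf (c :: t)) = false := by
          simp [List.isPrefixOf]; exact fun hcd => absurd hcd.symm h
        simp only [this, if_neg h, Bool.false_eq_true, if_false]
        split_ifs <;> omega

theorem find_singleton (d : Char) (t : List Char) :
    PySem.Chars.find t [d] = if rf d t = -1 then -1 else rf d t := by
  simpa using go_singleton d t 0

set_option maxHeartbeats 1600000 in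
theorem ra_cmin (t : List Char) :
    ra t = cmin (rf ' ' t) (cmin (rf ':' t) (rf ',' t)) := by
  induction t with
  | nil => simp [ra, rf, cmin]
  | cons c t ih =>
      have h1 := rf_ge ' ' t; have h2 := rf_ge ':' t; have h3 := rf_ge ',' t
      simp only [ra, rf, ih, cmin]
      clear ih
      by_cases hs : c = ' ' <;> by_cases hc : c = ':' <;> by_cases hm : c = ',' <;>
        simp [hs, hc, hm] <;> (try split_ifs) <;> first | omega | exact ‹False›.elim

theorem loopA_some (cs : List Char) (ch : Char) (j : Nat) :
    loopA cs (some ch) j = skipRunB cs ch j := by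
  induction hn : cs.length - j using Nat.strong_induction_on generalizing j with
  | _ n ih =>
    rw [loopA, skipRunB]
    by_cases h : j < cs.length
    · rw [dif_pos h, dif_pos h]
      by_cases hc : cs[j] = ch
      · rw [if_pos hc, if_neg (by simp), if_neg (by simp [hc])]
        exact ih (cs.length - (j+1)) (by omega) (j+1) rfl
      · rw [if_neg hc, if_neg (by simp), if_pos ⟨by simp, by simpa using hc⟩]
    · rw [dif_neg h, dif_neg h]

theorem loopA_none (cs : List Char) (s : Nat) :
    loopA cs none s = if ra (cs.drop s) = -1 then -1 else (s : Int) + ra (cs.drop s) := by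
  induction hn : cs.length - s using Nat.strong_induction_on generalizing s with
  | _ n ih =>
    rw [loopA]
    by_cases h : s < cs.length
    · rw [dif_pos h]
      have hdrop : cs.drop s = cs[s] :: cs.drop (s+1) := List.drop_eq_getElem_cons h
      rw [hdrop]
      by_cases hdel : cs[s] = ' ' ∨ cs[s] = ':' ∨ cs[s] = ','
      · rw [if_pos ⟨rfl, hdel⟩]
        simp [ra, hdel]
      · rw [if_neg (by simp [hdel]), if_neg (by simp)]
        rw [ih (cs.length - (s+1)) (by omega) (s+1) rfl]
        have hge := ra_ge (cs.drop (s+1))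
        simp only [ra, if_neg hdel]
        split_ifs <;> push_cast <;> omega
    · rw [dif_neg h, List.drop_eq_nil_of_le (by omega)]
      simp [ra]

def sh (s : Nat) (x : Int) : Int := if x = -1 then -1 else (s : Int) + x

theorem combine (s : Nat) (a b c : Int) (ha : -1 ≤ a) (hb : -1 ≤ b) (hc : -1 ≤ c) :
    PySem.List.minD (List.filter (fun x => x ≠ -1) [sh s a, sh s b, sh s c]) (fun x => x) (-1)
      = sh s (cmin a (cmin b c)) := by
  unfold PySem.List.minD
  cases h : PySem.List.min? (List.filter (fun x => x ≠ -1) [sh s a, sh s b, sh s c]) (fun x => x) with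
  | none =>
      rw [PySem.List.min?_eq_none_iff, List.filter_eq_nil_iff] at h
      have h1 := h (sh s a) (by simp)
      have h2 := h (sh s b) (by simp)
      have h3 := h (sh s c) (by simp)
      simp at h1 h2 h3
      simp only [Option.getD_none, sh, cmin] at *
      split_ifs at * <;> omega
  | some m =>
      have hm := PySem.List.min?_mem h
      have hmin := PySem.List.min?_isMin h
      simp only [List.mem_filter, List.mem_cons, List.not_mem_nil, or_false] at hm
      obtain ⟨hmem, hne0⟩ := hm
      have hne : m ≠ -1 := by simpa using hne0
      clear hne0
      have hA : sh s a ≠ -1 → m ≤ sh s a := fun hx => hmin _ (by simp [List.mem_filter, hx])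
      have hB : sh s b ≠ -1 → m ≤ sh s b := fun hx => hmin _ (by simp [List.mem_filter, hx])
      have hC : sh s c ≠ -1 → m ≤ sh s c := fun hx => hmin _ (by simp [List.mem_filter, hx])
      simp only [Option.getD_some]
      simp only [sh, cmin] at *
      split_ifs at * <;> omega

-- ===== VERDICT (by name: the statement is the Claim_ definition above) =====
theorem index_of_next_space_spec : Claim_equal_index_of_next_space := by
  intro line start _
  unfold Spec_index_of_next_space index_of_next_space index_of_next_space_alt
  by_cases hg : start < 0 ∨ start ≥ PySem.Str.len line
  · rw [if_pos hg, if_pos hg]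
  · rw [if_neg hg, if_neg hg]
    have h0 : 0 ≤ start := le_of_not_gt (fun h => hg (Or.inl h))
    have hlt : start < PySem.Str.len line := lt_of_not_ge (fun h => hg (Or.inr h))
    have hlen : PySem.Str.len line = (line.toList.length : Int) := by
      simp [PySem.Str.len]
    set cs := line.toList with hcs
    set s := start.toNat with hsdef
    have hsl : s < cs.length := by rw [hlen] at hlt; omega
    have hstart : start = (s : Int) := by omega
    have hget : cs.getD s ' ' = cs[s] := List.getD_eq_getElem cs ' ' hsl
    by_cases hsp : cs.getD s ' ' = ':' ∨ cs.getD s ' ' = ','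
    · -- special-character case: A's first loop step recurses, then the loops coincide
      rw [if_pos hsp, if_pos hsp, loopA, dif_pos hsl,
          if_neg (by simp), if_neg (by rw [hget]; simp)]
      exact loopA_some cs (cs.getD s ' ') (s + 1)
    · -- normal case: the flag loop = the earliest of three substring searches
      rw [if_neg hsp, if_neg hsp]
      have hff : ∀ d : Char, PySem.Chars.findFrom cs [d] start none = sh s (rf d (cs.drop s)) := by
        intro d
        rw [hstart, PySem.Chars.findFrom_natCast cs [d] s (le_of_lt hsl), find_singleton]
        unfold sh
        split_ifs <;> omega
      rw [loopA_none, ra_cmin]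
      simp only [List.map_cons, List.map_nil, PySem.Str.findFrom,
        show (" " : String).toList = [' '] from rfl,
        show (":" : String).toList = [':'] from rfl,
        show ("," : String).toList = [','] from rfl]
      rw [hff ' ', hff ':', hff ',']
      exact (combine s _ _ _ (rf_ge _ _) (rf_ge _ _) (rf_ge _ _)).symm
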